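-- pv_equiv track=rewrite | github.com/jyu197/comp_sci_101 | apt_fortunatenumbers/FortunateNumbers.py | getFortunate
-- ===== SOURCE A (Python) =====
-- def getFortunate(a, b, c):
--     sums = []
--     for i in a:
--         for j in b:
--             for k in c:
--                 sums.append(i + j + k)
--     num = 0
--     for sum in set(sums):
--         isFortunate = True
--         for digit in str(sum):
--             if not ((digit == "5") | (digit == "8")):
--                 isFortunate = False
--                 break
--         if isFortunate:
--             num += 1
--     return num
-- ===== SOURCE B (Python) =====
-- def getFortunate(a, b, c):
--     # Enumerate the sparse "fortunate" candidates (digits all 5/8) up to the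
--     # largest possible triple-sum, and test each via pairwise-sum membership.
--     if not a or not b or not c:
--         return 0
--     ab = {x + y for x in a for y in b}
--     cs = set(c)
--     limit = max(ab) + max(cs)
--     count = 0
--     frontier = [f for f in (5, 8) if f <= limit]
--     while frontier:
--         for f in frontier:
--             if any(f - k in ab for k in cs):
--                 count += 1
--         frontier = [10 * f + d for f in frontier for d in (5, 8) if 10 * f + d <= limit]
--     return count
-- ===== Notes on version B (the rewrite author's own statement) =====
-- stated objective: faster
-- what changed: A enumerates all |a|*|b|*|c| triple sums and string-tests each distinct one; B builds the pairwise-sum set once and enumerates the ~2^d sparse fortunate candidates (digits all 5/8) up to the maximum possible sum, testing each by set membership.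
import Mathlib
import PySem

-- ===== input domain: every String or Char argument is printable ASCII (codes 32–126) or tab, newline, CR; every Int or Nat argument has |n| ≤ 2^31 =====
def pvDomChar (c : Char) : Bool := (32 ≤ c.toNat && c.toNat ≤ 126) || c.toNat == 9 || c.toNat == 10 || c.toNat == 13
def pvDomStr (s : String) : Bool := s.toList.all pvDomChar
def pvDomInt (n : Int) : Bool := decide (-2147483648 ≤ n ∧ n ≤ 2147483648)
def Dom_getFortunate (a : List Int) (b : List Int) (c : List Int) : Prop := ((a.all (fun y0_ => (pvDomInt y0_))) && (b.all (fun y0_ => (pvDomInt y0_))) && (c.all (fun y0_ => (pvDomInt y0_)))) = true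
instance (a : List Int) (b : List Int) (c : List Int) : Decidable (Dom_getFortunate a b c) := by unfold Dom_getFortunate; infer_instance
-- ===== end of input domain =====

-- B replaces A's triple loop over all i+j+k sums by enumerating the sparse
-- fortunate candidates (decimal digits all 5/8) up to the largest possible sum
-- and testing each one via pairwise-sum set membership: objective = faster.

-- ===== PORT A =====
-- the inner "for digit in str(sum): ... break" flag loop of A
def pvCheckA : List Char → Bool
  | [] => true
  | d :: ds => if !((d == '5') || (d == '8')) then false else pvCheckA ds

def getFortunate (a : List Int) (b : List Int) (c : List Int) : Int :=
  let sums := a.foldl (fun acc i =>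
    b.foldl (fun acc2 j =>
      c.foldl (fun acc3 k => acc3 ++ [i + j + k]) acc2) acc) ([] : List Int)
  -- "for sum in set(sums)": the counted result does not depend on iteration order
  (PySem.Set.ofList sums).foldl
    (fun num s => if pvCheckA (PySem.Int.toStr s).toList then num + 1 else num) 0

-- ===== PORT B =====
-- "any(f - k in ab for k in cs)" of Source B
def pvAch (ab cs : List Int) (f : Int) : Bool := cs.any (fun k => ab.contains (f - k))

-- "[10 * f + d for f in frontier for d in (5, 8) if 10 * f + d <= limit]" of Source B
def pvNext (limit : Int) (frontier : List Int) : List Int :=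
  frontier.flatMap (fun f =>
    (if 10 * f + 5 ≤ limit then [10 * f + 5] else []) ++
    (if 10 * f + 8 ≤ limit then [10 * f + 8] else []))

-- the "while frontier:" loop of Source B; the fuel only makes it total (the proofs
-- below show limit.toNat + 2 rounds are never exhausted)
def pvLoop (ab cs : List Int) (limit : Int) : Nat → List Int → Int → Int
  | 0, _, count => count
  | fuel + 1, frontier, count =>
    if frontier.isEmpty then count
    else pvLoop ab cs limit fuel (pvNext limit frontier)
      (frontier.foldl (fun acc f => if pvAch ab cs f then acc + 1 else acc) count)

def getFortunate_alt (a : List Int) (b : List Int) (c : List Int) : Int :=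
  if a.isEmpty || b.isEmpty || c.isEmpty then 0
  else
    let ab := PySem.Set.ofList (a.flatMap (fun x => b.map (fun y => x + y)))
    let cs := PySem.Set.ofList c
    -- max over a set: order-independent; both sets are nonempty here, so the
    -- "none" branch is a dead totality guard
    match PySem.List.max? ab (fun x => x), PySem.List.max? cs (fun x => x) with
    | some ma, some mc =>
      let limit := ma + mc
      pvLoop ab cs limit (limit.toNat + 2)
        ((if (5:Int) ≤ limit then [(5:Int)] else []) ++ (if (8:Int) ≤ limit then [(8:Int)] else [])) 0
    | _, _ => 0

-- ===== PRECONDITION & SPEC =====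
def Spec_getFortunate (a : List Int) (b : List Int) (c : List Int) (out : Int) : Prop := out = getFortunate_alt a b c
instance (a : List Int) (b : List Int) (c : List Int) (out : Int) : Decidable (Spec_getFortunate a b c out) := by unfold Spec_getFortunate; infer_instance

-- ===== CLAIM (what is proved, stated in full; the proofs are below) =====
def Claim_equal_getFortunate : Prop := ∀ (a : List Int) (b : List Int) (c : List Int), Dom_getFortunate a b c → Spec_getFortunate a b c (getFortunate a b c)

-- ===== LEMMAS AND PROOFS =====

def pvFortNat (n : Nat) : Bool :=
  if h : n < 10 then (n == 5 || n == 8)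
  else ((n % 10 == 5 || n % 10 == 8) && pvFortNat (n / 10))
  decreasing_by exact Nat.div_lt_self (by omega) (by omega)

def pvFortInt (s : Int) : Bool := if s < 0 then false else pvFortNat s.toNat

def pvDigits (n : Nat) : List Char :=
  if h : n < 10 then [Nat.digitChar n]
  else pvDigits (n / 10) ++ [Nat.digitChar (n % 10)]
  decreasing_by exact Nat.div_lt_self (by omega) (by omega)

theorem pvToDigitsCore_eq (fuel : Nat) : ∀ (n : Nat) (acc : List Char), n < fuel →
    Nat.toDigitsCore 10 fuel n acc = pvDigits n ++ acc := by
  induction fuel with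
  | zero => intro n acc h; omega
  | succ fuel ih =>
    intro n acc h
    rw [Nat.toDigitsCore]
    by_cases h0 : n / 10 = 0
    · have hn : n < 10 := by omega
      rw [pvDigits]
      simp [h0, hn, Nat.mod_eq_of_lt hn]
    · rw [if_neg h0, ih (n / 10) _ (by have := Nat.div_lt_self (by omega : 0 < n) (by omega : 1 < 10); omega)]
      have hn : ¬ n < 10 := by omega
      conv_rhs => rw [pvDigits]
      simp [hn]

theorem pvDigitChar_58 (m : Nat) (h : m < 10) :
    ((Nat.digitChar m == '5' || Nat.digitChar m == '8')) = (m == 5 || m == 8) := by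
  interval_cases m <;> decide

theorem pvAll_digits (n : Nat) :
    (pvDigits n).all (fun d => d == '5' || d == '8') = pvFortNat n := by
  induction n using pvDigits.induct with
  | case1 n h =>
    rw [pvDigits, pvFortNat]
    simp only [dif_pos h, List.all_cons, List.all_nil, Bool.and_true]
    exact pvDigitChar_58 n h
  | case2 n h ih =>
    rw [pvDigits, pvFortNat]
    simp only [dif_neg h, List.all_append, List.all_cons, List.all_nil, Bool.and_true, ih]
    rw [pvDigitChar_58 (n % 10) (Nat.mod_lt _ (by omega))]
    rw [Bool.and_comm]

theorem pvCheckA_eq_all (cs : List Char) :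
    pvCheckA cs = cs.all (fun d => d == '5' || d == '8') := by
  induction cs with
  | nil => rfl
  | cons d ds ih =>
    simp only [pvCheckA, List.all_cons, ih]
    by_cases h5 : d = '5' <;> by_cases h8 : d = '8' <;> simp [h5, h8]

theorem pvCheckA_toStr (s : Int) :
    pvCheckA (PySem.Int.toStr s).toList = pvFortInt s := by
  rw [PySem.Int.toList_toStr, pvCheckA_eq_all, PySem.Int.toChars, pvFortInt]
  by_cases hs : s < 0
  · simp [hs]
  · simp only [hs, if_false]
    rw [Nat.toDigits, pvToDigitsCore_eq _ _ _ (Nat.lt_succ_self _), List.append_nil, pvAll_digits]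

theorem pvSums_eq (a b c : List Int) :
    a.foldl (fun acc i =>
      b.foldl (fun acc2 j =>
        c.foldl (fun acc3 k => acc3 ++ [i + j + k]) acc2) acc) ([] : List Int)
    = a.flatMap (fun i => b.flatMap (fun j => c.map (fun k => i + j + k))) := by
  have h1 : ∀ (i : Int) (acc2 : List Int),
      b.foldl (fun acc2 j => c.foldl (fun acc3 k => acc3 ++ [i + j + k]) acc2) acc2
      = acc2 ++ b.flatMap (fun j => c.map (fun k => i + j + k)) := by
    intro i acc2
    have h2 : (fun acc2 j => c.foldl (fun acc3 k => acc3 ++ [i + j + k]) acc2)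
        = fun (acc2 : List Int) j => acc2 ++ c.map (fun k => i + j + k) := by
      funext acc2 j
      exact PySem.List.foldl_append_singleton_eq_map _ _ _
    rw [h2, PySem.List.foldl_append_eq_flatMap]
  have h3 : (fun acc i => b.foldl (fun acc2 j => c.foldl (fun acc3 k => acc3 ++ [i + j + k]) acc2) acc)
      = fun (acc : List Int) i => acc ++ b.flatMap (fun j => c.map (fun k => i + j + k)) := by
    funext acc i; exact h1 i acc
  rw [h3, PySem.List.foldl_append_eq_flatMap, List.nil_append]

theorem getFortunate_eq_countP (a b c : List Int) :
    getFortunate a b c =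
      ((PySem.Set.ofList (a.flatMap (fun i => b.flatMap (fun j => c.map (fun k => i + j + k))))).countP pvFortInt : Int) := by
  rw [getFortunate]
  simp only [pvSums_eq]
  have h : (fun (num : Int) s => if pvCheckA (PySem.Int.toStr s).toList then num + 1 else num)
      = fun (num : Int) s => if pvFortInt s then num + 1 else num := by
    funext num s; rw [pvCheckA_toStr]
  rw [h, PySem.List.foldl_count_if, zero_add]

def pvF (limit : Int) (r : Nat) : List Int :=
  (pvNext limit)^[r] ((if (5:Int) ≤ limit then [(5:Int)] else []) ++ (if (8:Int) ≤ limit then [(8:Int)] else []))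

theorem pvMem_next (limit : Int) (L : List Int) (x : Int) :
    x ∈ pvNext limit L ↔ ∃ f ∈ L, (x = 10 * f + 5 ∨ x = 10 * f + 8) ∧ x ≤ limit := by
  simp only [pvNext, List.mem_flatMap, List.mem_append]
  constructor
  · rintro ⟨f, hf, h⟩
    rcases h with h | h <;>
      (split at h <;> simp at h) <;> exact ⟨f, hf, by omega, by omega⟩
  · rintro ⟨f, hf, hd, hle⟩
    refine ⟨f, hf, ?_⟩
    rcases hd with h | h
    · left; simp [h ▸ hle, h]
    · right; simp [h ▸ hle, h]

theorem pvFortNat_lt10 (m : Nat) (h : m < 10) : pvFortNat m = (m == 5 || m == 8) := by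
  rw [pvFortNat]; simp [h]

theorem pvFortNat_ge10 (m : Nat) (h : ¬ m < 10) :
    pvFortNat m = ((m % 10 == 5 || m % 10 == 8) && pvFortNat (m / 10)) := by
  rw [pvFortNat]; simp [h]

theorem pvMem_F (limit : Int) (r : Nat) (x : Int) :
    x ∈ pvF limit r ↔ pvFortInt x = true ∧ x ≤ limit ∧ (10:Int)^r ≤ x ∧ x < 10^(r+1) := by
  induction r generalizing x with
  | zero =>
    simp only [pvF, Function.iterate_zero, id, List.mem_append, pow_zero, pow_one]
    constructor
    · intro h
      have hx : (5 ≤ limit ∧ x = 5) ∨ (8 ≤ limit ∧ x = 8) := by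
        rcases h with h | h <;> (split at h <;> simp_all)
      rcases hx with ⟨hl, rfl⟩ | ⟨hl, rfl⟩ <;>
        refine ⟨?_, by omega, by omega, by omega⟩ <;>
        · rw [pvFortInt]
          norm_num
          rw [pvFortNat_lt10 _ (by norm_num)]
          rfl
    · rintro ⟨hf, hle, h1, h10⟩
      have hx0 : ¬ x < 0 := by omega
      rw [pvFortInt, if_neg hx0] at hf
      rw [pvFortNat_lt10 _ (by omega)] at hf
      have : x.toNat = 5 ∨ x.toNat = 8 := by
        rcases Bool.or_eq_true_iff.mp hf with h | h <;> [left; right] <;> simpa using h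
      have : x = 5 ∨ x = 8 := by omega
      rcases this with rfl | rfl
      · left; simp [hle]
      · right; simp [hle]
  | succ r ih =>
    have hP : (1:Int) ≤ 10 ^ r := one_le_pow₀ (by omega)
    rw [pvF, Function.iterate_succ_apply', pvMem_next]
    constructor
    · rintro ⟨f, hf, hd, hle⟩
      rw [show (pvNext limit)^[r] _ = pvF limit r from rfl] at hf
      obtain ⟨hfort, hfle, hlo, hhi⟩ := (ih f).mp hf
      have hf0 : ¬ f < 0 := by omega
      have hx0 : ¬ x < 0 := by omega
      rw [pvFortInt, if_neg hf0] at hfort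
      have hxf : x.toNat = 10 * f.toNat + (x.toNat % 10) ∧ x.toNat / 10 = f.toNat ∧ ¬ x.toNat < 10 := by
        omega
      refine ⟨?_, hle, ?_, ?_⟩
      · rw [pvFortInt, if_neg hx0, pvFortNat_ge10 _ hxf.2.2, hxf.2.1, hfort,
          Bool.and_true]
        have : x.toNat % 10 = 5 ∨ x.toNat % 10 = 8 := by omega
        rcases this with h | h <;> simp [h]
      · rw [pow_succ]; rcases hd with rfl | rfl <;> linarith
      · rw [pow_succ, pow_succ]; rw [pow_succ] at hhi; rcases hd with rfl | rfl <;> linarith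
    · rintro ⟨hfort, hle, hlo, hhi⟩
      have hx0 : ¬ x < 0 := by nlinarith [one_le_pow₀ (show (1:Int) ≤ 10 by omega) (n := r + 1)]
      rw [pvFortInt, if_neg hx0] at hfort
      have hge : ¬ x.toNat < 10 := by
        have : (10:Int) ≤ 10 ^ (r + 1) := by
          calc (10:Int) = 10 ^ 1 := (pow_one 10).symm
          _ ≤ 10 ^ (r+1) := pow_le_pow_right₀ (by omega) (by omega)
        omega
      rw [pvFortNat_ge10 _ hge, Bool.and_eq_true, Bool.or_eq_true_iff] at hfort
      obtain ⟨hdig, hrest⟩ := hfort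
      refine ⟨((x.toNat / 10 : Nat) : Int), ?_, ?_, hle⟩
      · rw [show (pvNext limit)^[r] _ = pvF limit r from rfl, ih]
        refine ⟨?_, ?_, ?_, ?_⟩
        · rw [pvFortInt, if_neg (by omega), Int.toNat_natCast]
          exact hrest
        · omega
        · have h1 : (10:Int) ^ (r+1) = ((10 ^ (r+1) : Nat) : Int) := by push_cast; ring
          rw [h1] at hlo
          have h2 : 10 ^ (r + 1) ≤ x.toNat := by omega
          have : 10 ^ r ≤ x.toNat / 10 := by
            rw [Nat.le_div_iff_mul_le (by omega)]
            calc 10 ^ r * 10 = 10 ^ (r+1) := by ring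
            _ ≤ x.toNat := h2
          calc (10:Int) ^ r = ((10 ^ r : Nat) : Int) := by push_cast; ring
          _ ≤ ((x.toNat / 10 : Nat) : Int) := by exact_mod_cast this
        · have h1 : (10:Int) ^ (r+1+1) = ((10 ^ (r+2) : Nat) : Int) := by push_cast; ring
          rw [h1] at hhi
          have h2 : x.toNat < 10 ^ (r + 2) := by omega
          have : x.toNat / 10 < 10 ^ (r+1) := by
            rw [Nat.div_lt_iff_lt_mul (by omega)]
            calc x.toNat < 10 ^ (r+2) := h2
            _ = 10 ^ (r+1) * 10 := by ring
          calc ((x.toNat / 10 : Nat) : Int) < ((10 ^ (r+1) : Nat) : Int) := by exact_mod_cast this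
          _ = (10:Int) ^ (r+1) := by push_cast; ring
      · have hsplit : x.toNat % 10 = 5 ∨ x.toNat % 10 = 8 := by
          rcases hdig with h | h <;> [left; right] <;> simpa using h
        omega

theorem pvNodup_next (limit : Int) (L : List Int) (hL : L.Nodup) : (pvNext limit L).Nodup := by
  induction L with
  | nil => simp [pvNext]
  | cons f L ih =>
    rw [pvNext, List.flatMap_cons]
    rw [List.nodup_cons] at hL
    refine List.Nodup.append ?_ (ih hL.2) ?_
    · split <;> split <;> simp
    · intro y hy hy2
      rw [show (L.flatMap _) = pvNext limit L from rfl, pvMem_next] at hy2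
      obtain ⟨g, hg, hdg, _⟩ := hy2
      have hyf : (y = 10 * f + 5 ∨ y = 10 * f + 8) := by
        rcases List.mem_append.mp hy with h | h <;> (split at h <;> simp_all)
      have : f = g := by omega
      exact hL.1 (this ▸ hg)

theorem pvNodup_F (limit : Int) (r : Nat) : (pvF limit r).Nodup := by
  induction r with
  | zero =>
    simp only [pvF, Function.iterate_zero, id]
    split <;> split <;> simp
  | succ r ih =>
    rw [pvF, Function.iterate_succ_apply']
    exact pvNodup_next limit _ ih

theorem pvF_empty_succ (limit : Int) (r : Nat) (h : pvF limit r = []) :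
    pvF limit (r + 1) = [] := by
  rw [pvF, Function.iterate_succ_apply', show (pvNext limit)^[r] _ = pvF limit r from rfl, h]
  rfl

theorem pvF_empty_add (limit : Int) (r i : Nat) (h : pvF limit r = []) :
    pvF limit (r + i) = [] := by
  induction i with
  | zero => exact h
  | succ i ih => exact pvF_empty_succ limit (r + i) ih

theorem pvLoop_eq (ab cs : List Int) (limit : Int) :
    ∀ (fuel r : Nat) (count : Int), pvF limit (r + fuel) = [] →
    pvLoop ab cs limit fuel (pvF limit r) count =
      count + ∑ i ∈ Finset.range fuel, ((pvF limit (r + i)).countP (pvAch ab cs) : Int) := by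
  intro fuel
  induction fuel with
  | zero => intro r count _; simp [pvLoop]
  | succ fuel ih =>
    intro r count hend
    rw [pvLoop]
    by_cases hem : (pvF limit r).isEmpty
    · rw [if_pos hem]
      rw [List.isEmpty_iff] at hem
      have : ∀ i ∈ Finset.range (fuel + 1), ((pvF limit (r + i)).countP (pvAch ab cs) : Int) = 0 := by
        intro i _
        rw [pvF_empty_add limit r i hem]
        simp
      rw [Finset.sum_congr rfl this]
      simp
    · rw [if_neg hem]
      rw [show pvNext limit (pvF limit r) = pvF limit (r + 1) from by
        rw [pvF, pvF, Function.iterate_succ_apply']]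
      rw [PySem.List.foldl_count_if]
      rw [ih (r + 1) _ (by rw [show r + 1 + fuel = r + (fuel + 1) from by omega]; exact hend)]
      rw [Finset.sum_range_succ' (fun i => ((pvF limit (r + i)).countP (pvAch ab cs) : Int)) fuel]
      have : ∀ i ∈ Finset.range fuel, ((pvF limit (r + 1 + i)).countP (pvAch ab cs) : Int)
          = ((pvF limit (r + (i + 1))).countP (pvAch ab cs) : Int) := by
        intro i _; rw [show r + 1 + i = r + (i + 1) from by omega]
      rw [Finset.sum_congr rfl this]
      ring

theorem pvF_final_empty (limit : Int) : pvF limit (limit.toNat + 2) = [] := by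
  rw [List.eq_nil_iff_forall_not_mem]
  intro x hx
  obtain ⟨_, hle, hlo, _⟩ := (pvMem_F limit _ x).mp hx
  have h1 : limit.toNat < 10 ^ (limit.toNat + 2) := by
    calc limit.toNat < 10 ^ limit.toNat := Nat.lt_pow_self (by omega)
    _ ≤ 10 ^ (limit.toNat + 2) := Nat.pow_le_pow_right (by omega) (by omega)
  have h2 : ((10 ^ (limit.toNat + 2) : Nat) : Int) = (10:Int) ^ (limit.toNat + 2) := by
    push_cast; ring
  omega

theorem pvFort_pos (x : Int) (h : pvFortInt x = true) : 1 ≤ x := by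
  rw [pvFortInt] at h
  by_cases hx : x < 0
  · simp [hx] at h
  · rw [if_neg hx] at h
    rcases Nat.eq_zero_or_pos x.toNat with h0 | h0
    · rw [h0, pvFortNat_lt10 0 (by omega)] at h; simp at h
    · omega

theorem pvExists_r (limit x : Int) (h1 : 1 ≤ x) (h2 : x ≤ limit) :
    ∃ r < limit.toNat + 2, (10:Int)^r ≤ x ∧ x < 10^(r+1) := by
  have hm : x.toNat ≠ 0 := by omega
  refine ⟨Nat.log 10 x.toNat, ?_, ?_, ?_⟩
  · have ha : 10 ^ Nat.log 10 x.toNat ≤ x.toNat := Nat.pow_log_le_self 10 hm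
    have hb : Nat.log 10 x.toNat < 10 ^ Nat.log 10 x.toNat := Nat.lt_pow_self (by omega)
    omega
  · have ha : 10 ^ Nat.log 10 x.toNat ≤ x.toNat := Nat.pow_log_le_self 10 hm
    have hc : ((10 ^ Nat.log 10 x.toNat : Nat) : Int) = (10:Int) ^ Nat.log 10 x.toNat := by
      push_cast; ring
    omega
  · have hb : x.toNat < 10 ^ (Nat.log 10 x.toNat + 1) := Nat.lt_pow_succ_log_self (by omega) _
    have hc : ((10 ^ (Nat.log 10 x.toNat + 1) : Nat) : Int) = (10:Int) ^ (Nat.log 10 x.toNat + 1) := by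
      push_cast; ring
    omega

theorem pvAch_iff (a b c : List Int) (x : Int) :
    pvAch (PySem.Set.ofList (a.flatMap (fun i => b.map (fun j => i + j)))) (PySem.Set.ofList c) x = true
      ↔ x ∈ a.flatMap (fun i => b.flatMap (fun j => c.map (fun k => i + j + k))) := by
  simp only [pvAch, List.any_eq_true, PySem.Set.mem_ofList, List.contains_iff_mem,
    List.mem_flatMap, List.mem_map]
  constructor
  · rintro ⟨k, hk, ⟨i, hi, j, hj, hij⟩⟩
    exact ⟨i, hi, j, hj, k, hk, by omega⟩
  · rintro ⟨i, hi, j, hj, k, hk, hijk⟩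
    exact ⟨k, hk, ⟨i, hi, j, hj, by omega⟩⟩

theorem pvCount_eq (a b c : List Int) (ma mc : Int)
    (hma : PySem.List.max? (PySem.Set.ofList (a.flatMap (fun i => b.map (fun j => i + j)))) (fun x => x) = some ma)
    (hmc : PySem.List.max? (PySem.Set.ofList c) (fun x => x) = some mc) :
    (((PySem.Set.ofList (a.flatMap (fun i => b.flatMap (fun j => c.map (fun k => i + j + k))))).countP pvFortInt : Int))
    = ∑ i ∈ Finset.range ((ma + mc).toNat + 2),
        (((pvF (ma + mc) i).countP (pvAch (PySem.Set.ofList (a.flatMap (fun i => b.map (fun j => i + j)))) (PySem.Set.ofList c))) : Int) := by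
  set ab := PySem.Set.ofList (a.flatMap (fun i => b.map (fun j => i + j))) with hab
  set cs := PySem.Set.ofList c with hcs
  set limit := ma + mc with hlimit
  set N := limit.toNat + 2 with hN
  set sums := a.flatMap (fun i => b.flatMap (fun j => c.map (fun k => i + j + k))) with hsums
  set T := PySem.Set.ofList sums with hT
  set q := pvAch ab cs with hq
  have hbound : ∀ x ∈ sums, x ≤ limit := by
    intro x hx
    rw [hsums] at hx
    simp only [List.mem_flatMap, List.mem_map] at hx
    obtain ⟨i, hi, j, hj, k, hk, rfl⟩ := hx
    have hmem : i + j ∈ a.flatMap (fun i => b.map (fun j => i + j)) :=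
      List.mem_flatMap.mpr ⟨i, hi, List.mem_map.mpr ⟨j, hj, rfl⟩⟩
    have h1 := PySem.List.max?_isMax hma (i + j) ((PySem.Set.mem_ofList _ _).mpr hmem)
    have h2 := PySem.List.max?_isMax hmc k ((PySem.Set.mem_ofList _ _).mpr hk)
    simp only at h1 h2
    omega
  have hqiff : ∀ x, q x = true ↔ x ∈ sums := fun x => pvAch_iff a b c x
  set S : Nat → Finset Int := fun i => ((pvF limit i).filter q).toFinset with hS
  have hcard : ∀ i : Nat, (pvF limit i).countP q = (S i).card := by
    intro i
    rw [List.countP_eq_length_filter, hS]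
    exact (List.toFinset_card_of_nodup ((pvNodup_F limit i).filter q)).symm
  have hdisj : ∀ i ∈ Finset.range N, ∀ j ∈ Finset.range N, i ≠ j → Disjoint (S i) (S j) := by
    intro i _ j _ hne
    rw [Finset.disjoint_left]
    intro x hxi hxj
    rw [hS] at hxi hxj
    simp only [List.mem_toFinset, List.mem_filter] at hxi hxj
    obtain ⟨_, _, hlo1, hhi1⟩ := (pvMem_F limit i x).mp hxi.1
    obtain ⟨_, _, hlo2, hhi2⟩ := (pvMem_F limit j x).mp hxj.1
    rcases Nat.lt_or_ge i j with h | h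
    · have : (10:Int) ^ (i+1) ≤ 10 ^ j := pow_le_pow_right₀ (by omega) (by omega)
      omega
    · have hji : j < i := by omega
      have : (10:Int) ^ (j+1) ≤ 10 ^ i := pow_le_pow_right₀ (by omega) (by omega)
      omega
  have hunion : (Finset.range N).biUnion S = (T.filter pvFortInt).toFinset := by
    apply Finset.ext
    intro x
    simp only [Finset.mem_biUnion, Finset.mem_range, hS, List.mem_toFinset, List.mem_filter]
    constructor
    · rintro ⟨i, hiN, hxF, hxq⟩
      obtain ⟨hfort, _, _, _⟩ := (pvMem_F limit i x).mp hxF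
      exact ⟨(PySem.Set.mem_ofList _ _).mpr ((hqiff x).mp hxq), hfort⟩
    · rintro ⟨hxT, hfort⟩
      have hxs : x ∈ sums := (PySem.Set.mem_ofList _ _).mp hxT
      obtain ⟨r, hrN, hlo, hhi⟩ := pvExists_r limit x (pvFort_pos x hfort) (hbound x hxs)
      exact ⟨r, hrN, (pvMem_F limit r x).mpr ⟨hfort, hbound x hxs, hlo, hhi⟩,
        (hqiff x).mpr hxs⟩
  have hTcount : T.countP pvFortInt = ((T.filter pvFortInt).toFinset).card := by
    rw [List.countP_eq_length_filter]
    exact (List.toFinset_card_of_nodup ((PySem.Set.nodup_ofList sums).filter _)).symm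
  rw [hTcount, ← hunion, Finset.card_biUnion hdisj]
  push_cast
  exact Finset.sum_congr rfl (fun i _ => by rw [hcard i])

theorem getFortunate_eq_alt (a b c : List Int) : getFortunate a b c = getFortunate_alt a b c := by
  rw [getFortunate_eq_countP, getFortunate_alt]
  by_cases hguard : a.isEmpty || b.isEmpty || c.isEmpty
  · rw [if_pos hguard]
    have hnil : a.flatMap (fun i => b.flatMap (fun j => c.map (fun k => i + j + k))) = [] := by
      rcases Bool.or_eq_true_iff.mp hguard with h | h
      · rcases Bool.or_eq_true_iff.mp h with h | h
        · rw [List.isEmpty_iff.mp h]; rfl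
        · rw [List.isEmpty_iff.mp h]; simp
      · rw [List.isEmpty_iff.mp h]; simp
    rw [hnil]
    rfl
  · rw [if_neg hguard]
    simp only [Bool.or_eq_true, not_or, Bool.not_eq_true,
      List.isEmpty_eq_false_iff_exists_mem] at hguard
    obtain ⟨⟨⟨xa, hxa⟩, ⟨xb, hxb⟩⟩, ⟨xc, hxc⟩⟩ := hguard
    have habne : xa + xb ∈ PySem.Set.ofList (a.flatMap (fun x => b.map (fun y => x + y))) :=
      (PySem.Set.mem_ofList _ _).mpr (List.mem_flatMap.mpr ⟨xa, hxa, List.mem_map.mpr ⟨xb, hxb, rfl⟩⟩)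
    have hcsne : xc ∈ PySem.Set.ofList c := (PySem.Set.mem_ofList _ _).mpr hxc
    obtain ⟨ma, hma⟩ : ∃ ma, PySem.List.max? (PySem.Set.ofList (a.flatMap (fun x => b.map (fun y => x + y)))) (fun x => x) = some ma := by
      cases h : PySem.List.max? (PySem.Set.ofList (a.flatMap (fun x => b.map (fun y => x + y)))) (fun x => x) with
      | none =>
        rw [PySem.List.max?_eq_none_iff] at h
        rw [h] at habne
        exact absurd habne (List.not_mem_nil)
      | some m => exact ⟨m, rfl⟩
    obtain ⟨mc, hmc⟩ : ∃ mc, PySem.List.max? (PySem.Set.ofList c) (fun x => x) = some mc := by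
      cases h : PySem.List.max? (PySem.Set.ofList c) (fun x => x) with
      | none =>
        rw [PySem.List.max?_eq_none_iff] at h
        rw [h] at hcsne
        exact absurd hcsne (List.not_mem_nil)
      | some m => exact ⟨m, rfl⟩
    simp only [hma, hmc]
    have hstart : ((if (5:Int) ≤ ma + mc then [(5:Int)] else []) ++ (if (8:Int) ≤ ma + mc then [(8:Int)] else []))
        = pvF (ma + mc) 0 := by rw [pvF, Function.iterate_zero, id]
    rw [hstart,
      pvLoop_eq _ _ (ma + mc) ((ma + mc).toNat + 2) 0 0 (by simpa using pvF_final_empty (ma + mc)),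
      pvCount_eq a b c ma mc hma hmc]
    simp

-- ===== VERDICT (by name: the statement is the Claim_ definition above) =====
theorem getFortunate_spec : Claim_equal_getFortunate := by
  intro a b c _
  unfold Spec_getFortunate
  exact getFortunate_eq_alt a b c
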